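-- pv_equiv track=rewrite | github.com/JakubDotPy/AdventOfCode2015 | day11/part1.py | has_consecutive_triple
-- ===== SOURCE A (Python) =====
-- import collections
-- from itertools import islice
--
-- def sliding_window(iterable, n):
--     # sliding_window('ABCDEFG', 4) -> ABCD BCDE CDEF DEFG
--     it = iter(iterable)
--     window = collections.deque(islice(it, n), maxlen=n)
--     if len(window) == n:
--         yield tuple(window)
--     for x in it:
--         window.append(x)
--         yield tuple(window)
--
-- def has_consecutive_triple(password):
--     def is_consecutive(triplet):
--         a, b, c = triplet
--         return ord(a) + 2 == ord(b) + 1 == ord(c)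
--
--     return any(
--         is_consecutive(triplet)
--         for triplet in sliding_window(password, 3)
--         )
-- ===== SOURCE B (Python) =====
-- def has_consecutive_triple(password):
--     prev = None
--     run = 1
--     for cur in password:
--         if prev is not None and ord(cur) == ord(prev) + 1:
--             run += 1
--         else:
--             run = 1
--         if run >= 3:
--             return True
--         prev = cur
--     return False
-- ===== Notes on version B (the rewrite author's own statement) =====
-- stated objective: simpler
-- what changed: Replaced the generator-based sliding window of 3-tuples with a single forward pass keeping only the previous character and a running ascending-streak counter, returning True as soon as the streak reaches 3; this also avoids building a tuple per position (measured constant-factor speedup).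
import Mathlib
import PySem

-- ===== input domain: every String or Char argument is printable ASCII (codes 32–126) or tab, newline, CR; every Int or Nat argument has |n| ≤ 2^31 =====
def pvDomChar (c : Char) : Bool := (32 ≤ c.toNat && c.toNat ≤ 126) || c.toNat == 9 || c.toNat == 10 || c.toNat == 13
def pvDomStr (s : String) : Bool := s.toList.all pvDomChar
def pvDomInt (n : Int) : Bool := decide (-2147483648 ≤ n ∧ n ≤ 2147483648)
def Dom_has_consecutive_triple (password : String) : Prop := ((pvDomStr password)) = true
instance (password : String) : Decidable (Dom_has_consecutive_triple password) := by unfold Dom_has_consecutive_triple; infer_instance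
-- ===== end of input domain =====

-- B replaces the sliding-window-of-triples scan with a single forward pass keeping a running streak counter (simpler decomposition, same O(n)).


-- ===== PORT A =====
-- sliding_window(password, 3): the list of all 3-tuples of consecutive characters
def pvWindows3 : List Char → List (Char × Char × Char)
  | a :: b :: c :: rest => (a, b, c) :: pvWindows3 (b :: c :: rest)
  | _ => []

-- is_consecutive(triplet): ord(a)+2 == ord(b)+1 == ord(c) (a chained comparison: both equalities)
def pvIsConsecutive (t : Char × Char × Char) : Bool :=
  t.1.toNat + 2 = t.2.1.toNat + 1 && t.2.1.toNat + 1 = t.2.2.toNat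

def has_consecutive_triple (password : String) : Bool :=
  (pvWindows3 password.toList).any pvIsConsecutive

-- ===== PORT B =====
-- the for-loop of Source B: prev is the previous character (none initially), run the current streak
def pvAltLoop : Option Char → Int → List Char → Bool
  | _, _, [] => false
  | prev, run, cur :: rest =>
    let run' : Int :=
      match prev with
      | some p => if cur.toNat = p.toNat + 1 then run + 1 else 1
      | none => 1
    if run' ≥ 3 then true else pvAltLoop (some cur) run' rest

def has_consecutive_triple_alt (password : String) : Bool :=
  pvAltLoop none 1 password.toList

-- ===== PRECONDITION & SPEC =====
def Spec_has_consecutive_triple (password : String) (out : Bool) : Prop := out = has_consecutive_triple_alt password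
instance (password : String) (out : Bool) : Decidable (Spec_has_consecutive_triple password out) := by unfold Spec_has_consecutive_triple; infer_instance

-- ===== CLAIM (what is proved, stated in full; the proofs are below) =====
def Claim_equal_has_consecutive_triple : Prop := ∀ (password : String), Dom_has_consecutive_triple password → Spec_has_consecutive_triple password (has_consecutive_triple password)

-- ===== LEMMAS AND PROOFS =====

-- A's scan, written as the obvious recursion (equal to the windows-based any)
def pvAnyTriple : List Char → Bool
  | a :: b :: c :: rest => pvIsConsecutive (a, b, c) || pvAnyTriple (b :: c :: rest)
  | _ => false

theorem pvAnyTriple_eq (l : List Char) :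
    (pvWindows3 l).any pvIsConsecutive = pvAnyTriple l := by
  fun_induction pvWindows3 l with
  | case1 a b c rest ih => simp [pvAnyTriple, ih]
  | case2 l h => cases l with
    | nil => simp [pvAnyTriple]
    | cons a t => cases t with
      | nil => simp [pvAnyTriple]
      | cons b t2 => cases t2 with
        | nil => simp [pvAnyTriple]
        | cons c r => exact absurd rfl (h a b c r)

-- joint invariant for the streak loop at run = 1 and run = 2
theorem pvAltLoop_inv (l : List Char) :
    (∀ p, pvAltLoop (some p) 1 l = pvAnyTriple (p :: l)) ∧
    (∀ p, pvAltLoop (some p) 2 l =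
      ((match l with | c :: _ => decide (c.toNat = p.toNat + 1) | [] => false) || pvAnyTriple (p :: l))) := by
  induction l with
  | nil =>
    constructor <;> intro p <;> simp [pvAltLoop, pvAnyTriple]
  | cons c rest ih =>
    constructor
    · intro p
      by_cases h : c.toNat = p.toNat + 1
      · simp only [pvAltLoop, h]
        norm_num
        rw [ih.2 c]
        cases rest with
        | nil => simp [pvAnyTriple]
        | cons d rs =>
          simp only [pvAnyTriple, pvIsConsecutive]
          simp only [h]
          congr 1
          simp
          omega
      · simp only [pvAltLoop, if_neg h]
        norm_num
        rw [ih.1 c]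
        cases rest with
        | nil => simp [pvAnyTriple]
        | cons d rs =>
          simp only [pvAnyTriple, pvIsConsecutive]
          have : ¬ (p.toNat + 2 = c.toNat + 1) := by omega
          simp [this]
    · intro p
      by_cases h : c.toNat = p.toNat + 1
      · simp only [pvAltLoop, h]
        norm_num [h]
      · simp only [pvAltLoop, if_neg h]
        norm_num
        rw [ih.1 c]
        cases rest with
        | nil => simp [pvAnyTriple, h]
        | cons d rs =>
          simp only [pvAnyTriple, pvIsConsecutive]
          have : ¬ (p.toNat + 2 = c.toNat + 1) := by omega
          simp [this, h]

theorem pvAltLoop_start (l : List Char) : pvAltLoop none 1 l = pvAnyTriple l := by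
  cases l with
  | nil => simp [pvAltLoop, pvAnyTriple]
  | cons c rest =>
    simp only [pvAltLoop]
    norm_num
    rw [(pvAltLoop_inv rest).1 c]

-- ===== VERDICT (by name: the statement is the Claim_ definition above) =====
theorem has_consecutive_triple_spec : Claim_equal_has_consecutive_triple := by
  intro password _
  unfold Spec_has_consecutive_triple has_consecutive_triple has_consecutive_triple_alt
  rw [pvAnyTriple_eq, pvAltLoop_start]
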